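-- pv_equiv track=rewrite | github.com/mario-bermonti/wdiff | wanalysis.py | has_silent_h
-- ===== SOURCE A (Python) =====
-- def has_silent_h(word):
--     """Determines the occurences of silent h's in the word based on the
--     spanish language rules.
--
--     returns: the number of silent h's in the word.
--     """
--
--     silenthCount = 0
--
--     if "h" in word:
--         hCount = word.count("h")
--         start = 0
--
--         while hCount > 0:
--             hPosition = word.find("h", start)
--             if not word[hPosition-1] == "c":
--                 silenthCount += 1
--             hCount -= 1
--             start = hPosition + 1
--
--     return silenthCount
-- ===== SOURCE B (Python) =====
-- def has_silent_h(word):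
--     """Determines the occurences of silent h's in the word based on the
--     spanish language rules.
--
--     returns: the number of silent h's in the word.
--     """
--     return sum(1 for i, ch in enumerate(word) if ch == "h" and word[i - 1] != "c")
-- ===== Notes on version B (the rewrite author's own statement) =====
-- stated objective: simpler
-- what changed: Replaced the count/find/while bookkeeping (counter, start cursor, repeated str.find) with a single direct scan over enumerate(word) that counts h's whose preceding character (Python index i-1, wrapping to the last character at i=0 exactly as A does) is not 'c'.
import Mathlib
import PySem

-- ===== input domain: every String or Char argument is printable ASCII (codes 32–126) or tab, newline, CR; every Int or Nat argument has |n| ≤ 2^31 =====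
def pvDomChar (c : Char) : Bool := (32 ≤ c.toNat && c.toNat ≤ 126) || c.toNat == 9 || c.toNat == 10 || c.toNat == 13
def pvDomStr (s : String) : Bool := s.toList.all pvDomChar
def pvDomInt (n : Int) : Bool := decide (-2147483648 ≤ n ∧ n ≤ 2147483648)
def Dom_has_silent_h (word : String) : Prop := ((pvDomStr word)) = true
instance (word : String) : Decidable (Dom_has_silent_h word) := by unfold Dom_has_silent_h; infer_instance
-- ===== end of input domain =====

-- B replaces A's count/find/while cursor loop by a single direct scan over enumerate(word); objective: simpler.

-- ===== PORT A =====
-- A's while loop: fuel = remaining hCount, cursor = start; word[hPosition-1] is ported with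
-- pyGetD (exact here: hPosition indexes an 'h' in word, so hPosition-1 is in Python's range,
-- wrapping to the last character when hPosition = 0).
def pvHLoop (cs : List Char) (fuel : Nat) (start : Nat) (acc : Int) : Int :=
  match fuel with
  | 0 => acc
  | n + 1 =>
    let hPos : Int := PySem.Chars.findFrom cs ['h'] (start : Int) none
    let acc' : Int := if ¬ (PySem.List.pyGetD cs (hPos - 1) ' ' = 'c') then acc + 1 else acc
    pvHLoop cs n (hPos + 1).toNat acc'

def has_silent_h (word : String) : Int :=
  if PySem.Str.isIn "h" word then
    pvHLoop word.toList (PySem.Str.count word "h") 0 0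
  else 0

-- ===== PORT B =====
def has_silent_h_alt (word : String) : Int :=
  ((PySem.List.enumerate word.toList 0).map
    (fun p => if p.2 = 'h' ∧ ¬ (PySem.List.pyGetD word.toList (p.1 - 1) ' ' = 'c')
              then (1 : Int) else 0)).sum

-- ===== PRECONDITION & SPEC =====
def Spec_has_silent_h (word : String) (out : Int) : Prop := out = has_silent_h_alt word
instance (word : String) (out : Int) : Decidable (Spec_has_silent_h word out) := by unfold Spec_has_silent_h; infer_instance

-- ===== CLAIM (what is proved, stated in full; the proofs are below) =====
def Claim_equal_has_silent_h : Prop := ∀ (word : String), Dom_has_silent_h word → Spec_has_silent_h word (has_silent_h word)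

-- ===== LEMMAS AND PROOFS =====

-- B's per-position summand, over the raw list
def pvF (cs : List Char) (p : Int × Char) : Int :=
  if p.2 = 'h' ∧ ¬ (PySem.List.pyGetD cs (p.1 - 1) ' ' = 'c') then 1 else 0

theorem pv_go_cnt : ∀ (l : List Char) (fuel acc : Nat), l.length ≤ fuel →
    PySem.Chars.count.go ['h'] fuel l acc = acc + l.count 'h' := by
  intro l
  induction l with
  | nil => intro fuel acc _; unfold PySem.Chars.count.go; cases fuel <;> simp
  | cons a t ih =>
    intro fuel acc hle
    cases fuel with
    | zero => simp at hle
    | succ n =>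
      unfold PySem.Chars.count.go
      have ht : t.length ≤ n := by simpa using hle
      simp only [List.isPrefixOf, List.count_cons]
      by_cases ha : 'h' = a
      · subst ha; simp [ih n (acc + 1) ht]; omega
      · simp [ha, Ne.symm ha, ih n acc ht]

theorem pv_cnt (l : List Char) : PySem.Chars.count l ['h'] = List.count 'h' l := by
  unfold PySem.Chars.count
  simp [pv_go_cnt l l.length 0 le_rfl]

theorem pv_pref_iff (l : List Char) (j : Nat) (h : j < l.length) :
    (['h'] <+: l.drop j) ↔ l[j] = 'h' := by
  rw [List.drop_eq_getElem_cons h]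
  constructor
  · rintro ⟨t, ht⟩
    have := congrArg (fun x => x[0]?) ht
    have h0 : l[j]? = some 'h' := by simpa using this.symm
    rw [List.getElem?_eq_getElem h] at h0
    exact Option.some.inj h0
  · intro h2; exact ⟨List.drop (j+1) l, by rw [h2]; rfl⟩

-- each zero-prefix sum vanishes: all entries of (enumerate part s) map to 0 when part has no 'h'
theorem pv_sum_zero (cs : List Char) (part : List Char) (s : Int)
    (h : ∀ c ∈ part, c ≠ 'h') :
    ((PySem.List.enumerate part s).map (pvF cs)).sum = 0 := by
  apply List.sum_eq_zero
  intro x hx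
  obtain ⟨p, hp, rfl⟩ := List.mem_map.mp hx
  obtain ⟨k, hk, rfl⟩ := (PySem.List.mem_enumerate_iff _ _ _).mp hp
  simp [pvF, h _ (List.getElem_mem hk)]

-- the key loop invariant
theorem pv_loop_eq (cs : List Char) : ∀ (n start : Nat) (acc : Int),
    start ≤ cs.length →
    (cs.drop start).count 'h' = n →
    pvHLoop cs n start acc
      = acc + ((PySem.List.enumerate (cs.drop start) start).map (pvF cs)).sum := by
  intro n
  induction n with
  | zero =>
    intro start acc _ hcnt
    have hnone : ∀ c ∈ cs.drop start, c ≠ 'h' := by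
      intro c hc hch
      have := List.count_pos_iff.mpr (hch ▸ hc)
      omega
    simp [pvHLoop, pv_sum_zero cs _ _ hnone]
  | succ n ih =>
    intro start acc hstart hcnt
    have hmem : 'h' ∈ cs.drop start := List.count_pos_iff.mp (by omega)
    have hne : PySem.Chars.findFrom cs ['h'] (start : Int) none ≠ -1 := by
      intro hno
      rw [PySem.Chars.findFrom_natCast_eq_neg_one_iff cs ['h'] start hstart] at hno
      exact hno ((List.singleton_infix_iff _ _).mpr hmem)
    obtain ⟨hle, hpref, hmin⟩ :=
      PySem.Chars.findFrom_natCast_spec cs ['h'] start hstart hne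
    have hp0 : (0 : Int) ≤ PySem.Chars.findFrom cs ['h'] (start : Int) none :=
      le_trans (by exact_mod_cast Int.natCast_nonneg start) hle
    set p : Int := PySem.Chars.findFrom cs ['h'] (start : Int) none with hpdef
    set q : Nat := p.toNat with hqdef
    have hpq : (q : Int) = p := Int.toNat_of_nonneg hp0
    have hqlt : q < cs.length := by
      have hlen := List.IsPrefix.length_le hpref
      simp [List.length_drop] at hlen
      omega
    have hch : cs[q] = 'h' := (pv_pref_iff cs q hqlt).mp hpref
    have hstartq : start ≤ q := by
      have : (start : Int) ≤ (q : Int) := by rw [hpq]; exact hle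
      exact_mod_cast this
    have hnoh : ∀ i, start ≤ i → i < q → ¬ (['h'] <+: cs.drop i) := hmin
    -- split the suffix at the found position
    have hsplit : cs.drop start = (cs.drop start).take (q - start) ++ cs.drop q := by
      conv_lhs => rw [← List.take_append_drop (q - start) (cs.drop start)]
      rw [List.drop_drop, Nat.add_sub_cancel' hstartq]
    have htklen : ((cs.drop start).take (q - start)).length = q - start := by
      simp [List.length_take, List.length_drop]
      omega
    have htkzero : ∀ c ∈ (cs.drop start).take (q - start), c ≠ 'h' := by
      intro c hc
      obtain ⟨k, hk, rfl⟩ := List.mem_iff_getElem.mp hc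
      rw [htklen] at hk
      have hk2 : k < (cs.drop start).length := by simp [List.length_drop]; omega
      rw [List.getElem_take, List.getElem_drop]
      intro hch2
      exact hnoh (start + k) (by omega) (by omega)
        ((pv_pref_iff cs (start + k) (by omega)).mpr hch2)
    have hdq : cs.drop q = cs[q] :: cs.drop (q + 1) := List.drop_eq_getElem_cons hqlt
    -- residual count
    have hcnt' : (cs.drop (q + 1)).count 'h' = n := by
      rw [hsplit, List.count_append, hdq, List.count_cons] at hcnt
      have h0 : ((cs.drop start).take (q - start)).count 'h' = 0 := by
        rw [List.count_eq_zero]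
        exact fun h => htkzero _ h rfl
      simp [h0, hch] at hcnt
      omega
    -- unfold one step of the loop
    have hstep : pvHLoop cs (n + 1) start acc
        = pvHLoop cs n (q + 1)
            (if ¬ (PySem.List.pyGetD cs ((q : Int) - 1) ' ' = 'c') then acc + 1 else acc) := by
      show pvHLoop cs n (p + 1).toNat _ = _
      rw [show (p + 1).toNat = q + 1 by omega, hpq]
    rw [hstep, ih (q + 1) _ (by omega) hcnt']
    -- rewrite the sum
    rw [hsplit, PySem.List.enumerate_append, List.map_append, List.sum_append,
      pv_sum_zero cs _ _ htkzero, hdq, htklen, PySem.List.enumerate_cons]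
    have hidx : (start : Int) + ((q - start : Nat) : Int) = (q : Int) := by
      push_cast [Nat.cast_sub hstartq]
      ring
    rw [hidx]
    simp only [List.map_cons, List.sum_cons, pvF, hch]
    by_cases hc : PySem.List.pyGetD cs ((q : Int) - 1) ' ' = 'c'
    · simp [hc]
    · simp [hc]; ring

theorem has_silent_h_spec_body (word : String) :
    has_silent_h word = has_silent_h_alt word := by
  unfold has_silent_h has_silent_h_alt
  have halt : (fun (p : Int × Char) =>
      if p.2 = 'h' ∧ ¬ (PySem.List.pyGetD word.toList (p.1 - 1) ' ' = 'c')
      then (1 : Int) else 0) = pvF word.toList := rfl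
  by_cases hin : PySem.Str.isIn "h" word = true
  · rw [if_pos hin]
    have hcnt : PySem.Str.count word "h" = (word.toList.drop 0).count 'h' := by
      simp [PySem.Str.count_eq, pv_cnt]
    rw [pv_loop_eq word.toList (PySem.Str.count word "h") 0 0 (Nat.zero_le _) hcnt.symm]
    simp [halt]
  · rw [if_neg hin]
    have hmem : 'h' ∉ word.toList := by
      intro hm
      exact hin ((PySem.Str.isIn_iff_infix "h" word).mpr
        ((List.singleton_infix_iff _ _).mpr hm))
    rw [halt, pv_sum_zero word.toList word.toList 0 (fun c hc hch => hmem (hch ▸ hc))]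

-- ===== VERDICT (by name: the statement is the Claim_ definition above) =====
theorem has_silent_h_spec : Claim_equal_has_silent_h := by
  intro word _
  unfold Spec_has_silent_h
  exact has_silent_h_spec_body word
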